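-- pv_equiv track=rewrite | github.com/scottdharris11/advent-of-code-2024 | day24.py | value_from_bits
-- ===== SOURCE A (Python) =====
-- def value_from_bits(wires: dict[str,int], prefix: chr) -> tuple[int,int]:
--     """compute value from bits with supplied prefix"""
--     output = 0
--     count = 0
--     for wire, value in wires.items():
--         if wire[0] != prefix:
--             continue
--         count += 1
--         if value == 0:
--             continue
--         shift = int(wire[1:])
--         svalue = 1 << shift
--         output |= svalue
--     return output, count
-- ===== SOURCE B (Python) =====
-- def value_from_bits(wires: dict[str, int], prefix: str) -> tuple[int, int]:
--     """compute value from bits with supplied prefix"""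
--     count = sum(1 for w in wires if w[:1] == prefix)
--     shifts = [int(w[1:]) for w, v in wires.items() if w[:1] == prefix and v != 0]
--     if not shifts:
--         return 0, count
--     bits = ['0'] * (max(shifts) + 1)
--     for s in shifts:
--         bits[s] = '1'
--     return int(''.join(reversed(bits)), 2), count
-- ===== Notes on version B (the rewrite author's own statement) =====
-- stated objective: alternative
-- what changed: B replaces A's single loop with a running bitwise-OR accumulator by staged passes over an explicit bit-table: it counts matches, collects the shifts of matching nonzero wires with a comprehension, marks them in a character array bits = ['0']*(max+1), and obtains the output by parsing the reversed array as a base-2 string (index assignment is idempotent, so duplicate shifts keep OR semantics).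
import Mathlib
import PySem

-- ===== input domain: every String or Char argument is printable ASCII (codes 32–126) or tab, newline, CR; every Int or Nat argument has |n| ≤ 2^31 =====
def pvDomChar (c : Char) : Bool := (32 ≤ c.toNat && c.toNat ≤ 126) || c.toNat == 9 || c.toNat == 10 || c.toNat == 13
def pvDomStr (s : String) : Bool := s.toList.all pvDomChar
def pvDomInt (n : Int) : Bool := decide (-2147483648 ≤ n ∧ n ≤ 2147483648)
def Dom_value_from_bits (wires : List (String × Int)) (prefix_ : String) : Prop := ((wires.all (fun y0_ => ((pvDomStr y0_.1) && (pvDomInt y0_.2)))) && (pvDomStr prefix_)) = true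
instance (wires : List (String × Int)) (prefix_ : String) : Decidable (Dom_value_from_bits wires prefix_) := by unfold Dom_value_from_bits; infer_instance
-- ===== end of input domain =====

-- B replaces A's single running-OR loop by staged passes over an explicit bit-table: count matches,
-- collect shifts, mark them in a '0'/'1' character array, parse it reversed as base 2 (objective: alternative).

-- ===== PORT A =====
-- A iterates over wires.items() keeping a running bitwise-OR `output` and a match counter `count`.
def valueLoopA (prefix_ : String) (items : List (String × Int)) (output count : Int) : Int × Int :=
  match items with
  | [] => (output, count)
  | (w, v) :: rest =>
    (PySem.Str.pyGet? w 0).elim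
      (valueLoopA prefix_ rest output count)   -- wire[0] raises IndexError in Python; excluded by Pre_
      (fun c =>
        if [c] ≠ prefix_.toList then valueLoopA prefix_ rest output count   -- wire[0] != prefix: continue
        else if v = 0 then valueLoopA prefix_ rest output (count + 1)       -- value == 0: continue
        else
          (PySem.Int.ofStr? (PySem.Str.slice w (some 1) none)).elim
            (valueLoopA prefix_ rest output (count + 1))                    -- int(wire[1:]) ValueError; excluded by Pre_
            (fun shift =>
              -- 1 << shift raises in Python for shift < 0; such inputs are excluded by Pre_
              valueLoopA prefix_ rest (PySem.Int.bor output ((1 : Int) <<< shift.toNat)) (count + 1)))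

def value_from_bits (wires : List (String × Int)) (prefix_ : String) : Int × Int :=
  valueLoopA prefix_ (PySem.Dict.ofList wires).items 0 0

-- ===== PORT B =====
-- w[:1] == prefix
def pvPredB (prefix_ : String) (p : String × Int) : Bool :=
  (PySem.Str.slice p.1 none (some 1)).toList == prefix_.toList

-- count = sum(1 for w in wires if w[:1] == prefix)
def pvCountB (prefix_ : String) (items : List (String × Int)) : Int :=
  items.foldl (fun c p => if pvPredB prefix_ p then c + 1 else c) 0

-- shifts = [int(w[1:]) for w, v in wires.items() if w[:1] == prefix and v != 0]
def pvShiftsB (prefix_ : String) (items : List (String × Int)) : List Int :=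
  items.filterMap (fun p =>
    if pvPredB prefix_ p && p.2 != 0 then
      PySem.Int.ofStr? (PySem.Str.slice p.1 (some 1) none)  -- int() ValueError skipped; excluded by Pre_
    else none)

-- int(''.join(reversed(bits)), 2), ported by hand as the MSB-first base-2 fold over reversed(bits);
-- exact whenever bits is a nonempty list of '0'/'1' characters, which it is by construction here.
def pvBitsVal (bits : List Char) : Nat :=
  bits.reverse.foldl (fun a c => a * 2 + (if c = '1' then 1 else 0)) 0

def value_from_bits_alt (wires : List (String × Int)) (prefix_ : String) : Int × Int :=
  let items := (PySem.Dict.ofList wires).items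
  let count := pvCountB prefix_ items
  let shifts := pvShiftsB prefix_ items
  if shifts = [] then (0, count)
  else
    -- max(shifts): shifts ≠ [] on this branch, so max? is some
    let m := (PySem.List.max? shifts (fun x => x)).getD 0
    -- bits = ['0'] * (max(shifts) + 1); for s in shifts: bits[s] = '1'
    let bits := shifts.foldl (fun b s => PySem.List.pySetD b s '1') (List.replicate (m + 1).toNat '0')
    ((pvBitsVal bits : Int), count)

-- ===== PRECONDITION & SPEC =====
-- Pre_ = exactly the inputs where the Python A returns: every dict key is nonempty (wire[0] would
-- raise IndexError), and every key matching the prefix whose (final) value is nonzero has a suffix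
-- that int() parses to a nonnegative shift (else int() raises ValueError, or 1 << negative raises).
def PreItem_value_from_bits (prefix_ : String) (p : String × Int) : Prop :=
  p.1.toList ≠ [] ∧
  ((p.1.toList.take 1 = prefix_.toList ∧ p.2 ≠ 0) →
    0 ≤ (PySem.Int.ofStr? (PySem.Str.slice p.1 (some 1) none)).getD (-1))

def Pre_value_from_bits (wires : List (String × Int)) (prefix_ : String) : Prop :=
  ∀ p ∈ (PySem.Dict.ofList wires).items, PreItem_value_from_bits prefix_ p

instance (wires : List (String × Int)) (prefix_ : String) : Decidable (Pre_value_from_bits wires prefix_) := by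
  unfold Pre_value_from_bits PreItem_value_from_bits; infer_instance

def pvWitness_value_from_bits : (List (String × Int)) × String := ([("x05", 1), ("x2", 1), ("x3", 0), ("y1", 1)], "x")

def Spec_value_from_bits (wires : List (String × Int)) (prefix_ : String) (out : Int × Int) : Prop := out = value_from_bits_alt wires prefix_
instance (wires : List (String × Int)) (prefix_ : String) (out : Int × Int) : Decidable (Spec_value_from_bits wires prefix_ out) := by unfold Spec_value_from_bits; infer_instance

-- ===== CLAIM (what is proved, stated in full; the proofs are below) =====
def Claim_equal_value_from_bits : Prop := ∀ (wires : List (String × Int)) (prefix_ : String), Dom_value_from_bits wires prefix_ → Pre_value_from_bits wires prefix_ → Spec_value_from_bits wires prefix_ (value_from_bits wires prefix_)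

-- ===== LEMMAS AND PROOFS =====

-- sum of 2^shift over a list of (nonnegative) Int shifts, computed in Nat
def pvNatSum (S : List Int) : Nat := (S.map (fun s => 2 ^ s.toNat)).sum

theorem pv_lor_two_pow_of_testBit_false : ∀ (n a : Nat), a.testBit n = false → a ||| 2 ^ n = a + 2 ^ n := by
  intro n
  induction n with
  | zero =>
    intro a h
    have h2 : a % 2 = 0 := by simpa [Nat.testBit_zero] using h
    obtain ⟨b, rfl⟩ : ∃ b, a = 2 * b := ⟨a / 2, by omega⟩
    have := Nat.lor_bit false b true 0
    simpa [Nat.bit] using this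
  | succ n ih =>
    intro a h
    have hb : (Nat.bit (a.testBit 0) (a >>> 1)) = a := Nat.bit_testBit_zero_shiftRight_one a
    have h1 : (a >>> 1).testBit n = false := by
      rw [Nat.shiftRight_one, ← Nat.testBit_succ]; exact h
    have ihr := ih (a >>> 1) h1
    have hpow : (2 : Nat) ^ (n + 1) = Nat.bit false (2 ^ n) := by simp [Nat.bit, Nat.pow_succ, Nat.mul_comm]
    calc a ||| 2 ^ (n + 1)
        = Nat.bit (a.testBit 0) (a >>> 1) ||| Nat.bit false (2 ^ n) := by rw [hb, ← hpow]
      _ = Nat.bit (a.testBit 0 || false) ((a >>> 1) ||| 2 ^ n) := Nat.lor_bit _ _ _ _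
      _ = a + 2 ^ (n + 1) := by
          rw [ihr]
          cases hB : a.testBit 0 <;>
          · have hb' := hb
            rw [hB] at hb'
            simp only [Bool.or_false, Nat.bit, cond_true, cond_false,
              Nat.shiftRight_one, Nat.pow_succ] at hb' ⊢
            omega

theorem pv_testBit_natSum (S : List Int) (hnd : S.Nodup) (hpos : ∀ s ∈ S, 0 ≤ s) :
    ∀ t : Nat, (pvNatSum S).testBit t = decide ((t : Int) ∈ S) := by
  induction S with
  | nil => simp [pvNatSum]
  | cons s S ih =>
    intro t
    have hndS : S.Nodup := hnd.of_cons
    have hposS : ∀ x ∈ S, 0 ≤ x := fun x hx => hpos x (List.mem_cons_of_mem _ hx)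
    have hs : 0 ≤ s := hpos s (List.mem_cons_self ..)
    have hnot : (↑s.toNat : Int) ∉ S := by
      rw [Int.toNat_of_nonneg hs]; exact (List.nodup_cons.mp hnd).1
    have hbit : (pvNatSum S).testBit s.toNat = false := by
      rw [ih hndS hposS s.toNat]; simpa using hnot
    have hsum : pvNatSum (s :: S) = pvNatSum S ||| 2 ^ s.toNat := by
      rw [pv_lor_two_pow_of_testBit_false _ _ hbit]
      simp [pvNatSum]; ring
    rw [hsum, Nat.testBit_lor, ih hndS hposS t, Nat.testBit_two_pow]
    by_cases h : (t : Int) ∈ S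
    · simp [h, List.mem_cons]
    · by_cases he : s.toNat = t
      · subst he
        have hts : (↑s.toNat : Int) = s := Int.toNat_of_nonneg hs
        simp [hts, List.mem_cons]
      · have hne : (t : Int) ≠ s := by
          intro hc
          exact he (by omega)
        simp [h, he, List.mem_cons, hne]

-- ORing 2^(s.toNat) into a value that is the sum over a nodup set S of nonneg shifts = sum over S.add s
theorem pv_bor_add (S : List Int) (s : Int) (hnd : S.Nodup) (hpos : ∀ x ∈ S, 0 ≤ x) (hs : 0 ≤ s) :
    PySem.Int.bor (↑(pvNatSum S)) ((1 : Int) <<< s.toNat) = ↑(pvNatSum (PySem.Set.add S s)) := by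
  have h1 : ((1 : Int) <<< s.toNat) = ((1 <<< s.toNat : Nat) : Int) := by
    simp [Nat.shiftLeft_eq, Int.shiftLeft_eq]
  rw [h1, PySem.Int.bor_natCast]
  by_cases hmem : s ∈ S
  · rw [PySem.Set.add_of_mem hmem]
    have hbit : (pvNatSum S).testBit s.toNat = true := by
      rw [pv_testBit_natSum S hnd hpos s.toNat, Int.toNat_of_nonneg hs]; simpa using hmem
    congr 1
    apply Nat.eq_of_testBit_eq
    intro t
    rw [Nat.testBit_lor, Nat.one_shiftLeft, Nat.testBit_two_pow]
    by_cases he : s.toNat = t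
    · subst he; simp [hbit]
    · simp [he]
  · rw [PySem.Set.add_of_not_mem hmem]
    have hbit : (pvNatSum S).testBit s.toNat = false := by
      rw [pv_testBit_natSum S hnd hpos s.toNat, Int.toNat_of_nonneg hs]; simpa using hmem
    rw [Nat.one_shiftLeft, pv_lor_two_pow_of_testBit_false _ _ hbit]
    simp [pvNatSum]

-- A's loop, started on the sum of a nodup set S of nonneg shifts, ends on the sum of S updated with
-- B's collected shifts, and its counter is B's counting fold continued from cnt.
theorem pv_loopA_eq (prefix_ : String) :
    ∀ (items : List (String × Int)) (S : PySem.Set Int) (cnt : Int),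
      S.Nodup → (∀ s ∈ S, 0 ≤ s) → (∀ p ∈ items, PreItem_value_from_bits prefix_ p) →
      valueLoopA prefix_ items (↑(pvNatSum S)) cnt =
        (↑(pvNatSum (PySem.Set.update S (pvShiftsB prefix_ items))),
         items.foldl (fun c p => if pvPredB prefix_ p then c + 1 else c) cnt) := by
  intro items
  induction items with
  | nil => intro S cnt _ _ _; rfl
  | cons p rest ih =>
    intro S cnt hnd hpos hpre
    obtain ⟨w, v⟩ := p
    have hprer : ∀ q ∈ rest, PreItem_value_from_bits prefix_ q := fun q hq => hpre q (List.mem_cons_of_mem _ hq)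
    obtain ⟨hne, hparse⟩ := hpre (w, v) (List.mem_cons_self ..)
    obtain ⟨c, cs, hw⟩ : ∃ c cs, w.toList = c :: cs := by
      cases hwl : w.toList with
      | nil => exact absurd hwl hne
      | cons c cs => exact ⟨c, cs, rfl⟩
    have hget : PySem.Str.pyGet? w 0 = some c := by
      have h0 : (0 : Int) = ((0 : Nat) : Int) := rfl
      rw [h0, PySem.Str.pyGet?_natCast, hw]; rfl
    have hslice : (PySem.Str.slice w none (some 1)).toList = [c] := by
      simp [PySem.Str.slice, PySem.Chars.slice, pysem, hw]
    have hpred : pvPredB prefix_ (w, v) = ([c] == prefix_.toList) := by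
      simp only [pvPredB]; rw [hslice]
    have htake : w.toList.take 1 = [c] := by rw [hw]; rfl
    show ((PySem.Str.pyGet? w 0).elim _ _) = _
    rw [hget]
    simp only [Option.elim_some]
    by_cases hm : [c] = prefix_.toList
    · have hpt : pvPredB prefix_ (w, v) = true := by rw [hpred]; exact beq_iff_eq.mpr hm
      simp only [if_neg (show ¬([c] ≠ prefix_.toList) from not_not_intro hm)]
      by_cases hv : v = 0
      · simp only [if_pos hv]
        have hsh : pvShiftsB prefix_ ((w, v) :: rest) = pvShiftsB prefix_ rest := by
          simp [pvShiftsB, hv]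
        rw [hsh]
        rw [ih S (cnt + 1) hnd hpos hprer]
        simp [List.foldl_cons, hpt]
      · simp only [if_neg hv]
        have hp := hparse ⟨by rw [htake, hm], hv⟩
        cases hof : PySem.Int.ofStr? (PySem.Str.slice w (some 1) none) with
        | none => rw [hof] at hp; norm_num [Option.getD] at hp
        | some shift =>
          rw [hof] at hp
          have hsn : 0 ≤ shift := by simpa using hp
          have hsh : pvShiftsB prefix_ ((w, v) :: rest) = shift :: pvShiftsB prefix_ rest := by
            simp [pvShiftsB, hpt, hv, hof]
          simp only [Option.elim_some]
          rw [pv_bor_add S shift hnd hpos hsn]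
          rw [ih (PySem.Set.add S shift) (cnt + 1) (PySem.Set.nodup_add S shift hnd)
            (fun x hx => by
              rcases (PySem.Set.mem_add S shift x).mp hx with h | h
              · exact hpos x h
              · exact h ▸ hsn) hprer]
          rw [hsh]
          simp [PySem.Set.update, List.foldl_cons, hpt]
    · have hpf : pvPredB prefix_ (w, v) = false := by
        rw [hpred]; exact beq_eq_false_iff_ne.mpr hm
      simp only [if_pos (show [c] ≠ prefix_.toList from hm)]
      have hsh : pvShiftsB prefix_ ((w, v) :: rest) = pvShiftsB prefix_ rest := by
        simp [pvShiftsB, hpf]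
      rw [hsh, ih S cnt hnd hpos hprer]
      simp [List.foldl_cons, hpf]

-- every collected shift is nonnegative (its parse succeeded with a nonnegative value, by Pre_)
theorem pv_shiftsB_nonneg (prefix_ : String) (items : List (String × Int))
    (hpre : ∀ p ∈ items, PreItem_value_from_bits prefix_ p) :
    ∀ s ∈ pvShiftsB prefix_ items, 0 ≤ s := by
  intro s hs
  obtain ⟨p, hp, hif⟩ := List.mem_filterMap.mp hs
  by_cases hc : (pvPredB prefix_ p && p.2 != 0) = true
  · rw [if_pos hc] at hif
    obtain ⟨hne, hparse⟩ := hpre p hp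
    obtain ⟨c, cs, hw⟩ : ∃ c cs, p.1.toList = c :: cs := by
      cases hwl : p.1.toList with
      | nil => exact absurd hwl hne
      | cons c cs => exact ⟨c, cs, rfl⟩
    have hslice : (PySem.Str.slice p.1 none (some 1)).toList = [c] := by
      simp [PySem.Str.slice, PySem.Chars.slice, pysem, hw]
    obtain ⟨hpt, hv⟩ := Bool.and_eq_true_iff.mp hc
    have hm : [c] = prefix_.toList := by
      have := beq_iff_eq.mp (by rw [pvPredB, hslice] at hpt; exact hpt)
      exact this
    have htake : p.1.toList.take 1 = prefix_.toList := by rw [hw]; simpa using hm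
    have hv' : p.2 ≠ 0 := by simpa using hv
    have := hparse ⟨htake, hv'⟩
    rw [hif] at this
    simpa using this
  · rw [if_neg hc] at hif; exact absurd hif (by simp)

-- the bit-table fold: cell t holds '1' exactly when t is one of the (nonneg, in-range) shifts
theorem pv_foldl_set_getElem? :
    ∀ (L : List Int) (b0 : List Char) (t : Nat),
      (∀ s ∈ L, 0 ≤ s ∧ s.toNat < b0.length) →
      (L.foldl (fun b s => PySem.List.pySetD b s '1') b0)[t]? =
        if (t : Int) ∈ L then some '1' else b0[t]? := by
  intro L
  induction L with
  | nil => intro b0 t _; simp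
  | cons s L ih =>
    intro b0 t hb
    obtain ⟨hs0, hsl⟩ := hb s (List.mem_cons_self ..)
    have hset : PySem.List.pySetD b0 s '1' = b0.set s.toNat '1' := PySem.List.pySetD_of_nonneg _ _ hs0
    rw [List.foldl_cons, hset, ih _ t
      (fun x hx => by
        obtain ⟨h1, h2⟩ := hb x (List.mem_cons_of_mem _ hx)
        exact ⟨h1, by simpa using h2⟩)]
    by_cases hL : (t : Int) ∈ L
    · simp [hL, List.mem_cons]
    · by_cases he : (t : Int) = s
      · have ht : s.toNat = t := by omega
        simp only [List.mem_cons, hL, or_false, if_pos he]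
        rw [← ht, List.getElem?_set_self (by omega)]
        simp
      · have hts : s.toNat ≠ t := by omega
        simp only [List.mem_cons, hL, or_false, if_neg he]
        rw [List.getElem?_set_ne hts]
        simp

-- base-2 value of the bit list, LSB-first recursion
theorem pv_bitsVal_cons (c : Char) (bs : List Char) :
    pvBitsVal (c :: bs) = (if c = '1' then 1 else 0) + 2 * pvBitsVal bs := by
  simp only [pvBitsVal, List.reverse_cons, List.foldl_append, List.foldl_cons, List.foldl_nil]
  ring

theorem pv_testBit_bitsVal : ∀ (bs : List Char) (t : Nat),
    (pvBitsVal bs).testBit t = ((bs[t]?.getD '0') == '1') := by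
  intro bs
  induction bs with
  | nil => intro t; simp [pvBitsVal]
  | cons c bs ih =>
    intro t
    rw [pv_bitsVal_cons]
    cases t with
    | zero =>
      rw [Nat.testBit_zero]
      by_cases hc : c = '1' <;> simp [hc]
    | succ t =>
      rw [Nat.testBit_add_one]
      have : ((if c = '1' then 1 else 0) + 2 * pvBitsVal bs) / 2 = pvBitsVal bs := by
        by_cases hc : c = '1'
        · simp [hc]; omega
        · simp [hc]
      rw [this, ih t]
      simp

-- B's assembled bit-table parses to the sum over the distinct shifts
theorem pv_bits_eq_natSum (L : List Int) (hL : L ≠ []) (hpos : ∀ s ∈ L, 0 ≤ s) :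
    pvBitsVal (L.foldl (fun b s => PySem.List.pySetD b s '1')
        (List.replicate (((PySem.List.max? L (fun x => x)).getD 0) + 1).toNat '0')) =
      pvNatSum (PySem.Set.ofList L) := by
  obtain ⟨m, hm⟩ : ∃ m, PySem.List.max? L (fun x => x) = some m := by
    cases L with
    | nil => exact absurd rfl hL
    | cons x t => exact ⟨t.foldl max x, PySem.List.max?_id_cons x t⟩
  have hmax : ∀ y ∈ L, y ≤ m := PySem.List.max?_isMax hm
  rw [hm, Option.getD_some]
  have hrange : ∀ s ∈ L, 0 ≤ s ∧ s.toNat < (List.replicate (m + 1).toNat '0').length := by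
    intro s hs
    refine ⟨hpos s hs, ?_⟩
    rw [List.length_replicate]
    have := hmax s hs
    have := hpos s hs
    omega
  apply Nat.eq_of_testBit_eq
  intro t
  rw [pv_testBit_bitsVal, pv_testBit_natSum (PySem.Set.ofList L) (PySem.Set.nodup_ofList L)
    (fun x hx => hpos x ((PySem.Set.mem_ofList _ _).mp hx)) t]
  rw [pv_foldl_set_getElem? L _ t hrange]
  by_cases hmem : (t : Int) ∈ L
  · simp [hmem, PySem.Set.mem_ofList]
  · simp only [if_neg hmem]
    rw [List.getElem?_replicate]
    have hrhs : decide ((t : Int) ∈ PySem.Set.ofList L) = false := by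
      simp [PySem.Set.mem_ofList, hmem]
    rw [hrhs]
    by_cases ht : t < (m + 1).toNat <;> simp [ht]

-- ===== VERDICT (by name: the statement is the Claim_ definition above) =====
theorem value_from_bits_spec : Claim_equal_value_from_bits := by
  intro wires prefix_ _ hpre
  unfold Spec_value_from_bits value_from_bits value_from_bits_alt
  have h := pv_loopA_eq prefix_ (PySem.Dict.ofList wires).items [] 0 List.nodup_nil
    (by simp) hpre
  have h0 : ((pvNatSum [] : Nat) : Int) = 0 := rfl
  rw [h0] at h
  have hup : PySem.Set.update ([] : PySem.Set Int) (pvShiftsB prefix_ (PySem.Dict.ofList wires).items)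
      = PySem.Set.ofList (pvShiftsB prefix_ (PySem.Dict.ofList wires).items) := rfl
  rw [hup] at h
  rw [h]
  simp only []
  by_cases hL : pvShiftsB prefix_ (PySem.Dict.ofList wires).items = []
  · rw [if_pos hL, hL]
    rfl
  · rw [if_neg hL]
    rw [pv_bits_eq_natSum _ hL (pv_shiftsB_nonneg prefix_ _ hpre)]
    rfl
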